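-- pv_equiv track=rewrite | github.com/oladapo-joseph/rock_paper_scissors | Random/jumping.py | jmp
-- ===== SOURCE A (Python) =====
-- def jmp (n, d):
--     a = 0
--     z= 0
--     if n >=2 and n <=100 and d[0]== 0:
--         for i in range(len(d)):
--             if d[i] == 0:
--                 z += 1
--             if d[i] == 1:
--                 a+=1
--                 a+=int(z/2)
--                 z = 0
--     return a
-- ===== SOURCE B (Python) =====
-- def jmp(n, d):
--     # Segment-based rewrite: repeatedly jump to the next 1, scoring 1 plus
--     # half the zeros in the segment before it; trailing values after the
--     # last 1 are never examined.  (On empty d with 2 <= n <= 100, A raises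
--     # IndexError; this version returns 0.)
--     if not (2 <= n <= 100) or not d or d[0] != 0:
--         return 0
--     total = 0
--     rest = d
--     while 1 in rest:
--         i = rest.index(1)
--         total += 1 + rest[:i].count(0) // 2
--         rest = rest[i + 1:]
--     return total
-- ===== Notes on version B (the rewrite author's own statement) =====
-- stated objective: idiomatic
-- what changed: A's single pass with a reset zero-counter and per-element branching is replaced by segment jumps: repeatedly locate the next 1 with list.index, add 1 plus count-of-zeros-in-the-segment // 2, and slice past it, so trailing values after the last 1 are never examined.
import Mathlib
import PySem

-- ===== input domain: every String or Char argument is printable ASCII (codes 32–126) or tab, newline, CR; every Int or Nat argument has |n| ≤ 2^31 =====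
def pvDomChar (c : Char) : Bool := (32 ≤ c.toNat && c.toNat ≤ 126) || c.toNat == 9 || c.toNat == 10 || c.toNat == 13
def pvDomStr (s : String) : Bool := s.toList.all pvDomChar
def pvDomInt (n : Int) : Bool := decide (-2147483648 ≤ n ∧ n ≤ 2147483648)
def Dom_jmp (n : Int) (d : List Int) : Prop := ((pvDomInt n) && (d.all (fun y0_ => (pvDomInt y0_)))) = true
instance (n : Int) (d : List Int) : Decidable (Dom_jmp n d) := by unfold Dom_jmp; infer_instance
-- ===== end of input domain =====

-- B rewrites A's single reset-counter pass as segment jumps (index/count/slice to the next 1); objective: idiomatic.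
-- ===== PORT A =====
-- A's loop body on element x = d[i]; `int(z/2)` is `floordiv z 2` exactly since z ≥ 0 throughout A's run.
def jmpStep (s : Int × Int) (x : Int) : Int × Int :=
  let s := if x = 0 then (s.1, s.2 + 1) else s
  if x = 1 then (s.1 + 1 + PySem.Int.floordiv s.2 2, 0) else s

def jmp (n : Int) (d : List Int) : Int :=
  if 2 ≤ n ∧ n ≤ 100 then
    match PySem.List.pyGet? d 0 with
    | none => 0  -- d[0] raises IndexError here; excluded by Pre_jmp
    | some d0 =>
      if d0 = 0 then
        ((PySem.List.pyRange 0 (d.length : Int) 1).foldl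
          (fun s i => jmpStep s (PySem.List.pyGetD d i 0)) ((0 : Int), (0 : Int))).1
      else 0
  else 0

-- ===== PORT B =====
-- `while 1 in rest: i = rest.index(1); total += 1 + rest[:i].count(0) // 2; rest = rest[i+1:]`
def jmpAltLoop (rest : List Int) (total : Int) : Int :=
  match h : PySem.List.index? rest 1 with
  | none => total
  | some i =>
      jmpAltLoop (PySem.List.slice rest (some ((i : Int) + 1)) none)
        (total + 1 +
          PySem.Int.floordiv ((PySem.List.count (PySem.List.slice rest none (some (i : Int))) 0 : Int)) 2)
termination_by rest.length
decreasing_by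
  have hmem : (1 : Int) ∈ rest := (PySem.List.index?_isSome_iff rest 1).mp (by rw [h]; rfl)
  have : (((i : Int) + 1)) = (((i + 1 : Nat) : Int)) := by push_cast; ring
  rw [this, PySem.List.slice_from_natCast]
  have : 0 < rest.length := List.length_pos_iff.mpr (by rintro rfl; simp at hmem)
  simp [List.length_drop]; omega

def jmp_alt (n : Int) (d : List Int) : Int :=
  if ¬(2 ≤ n ∧ n ≤ 100) ∨ d = [] ∨ ¬(d.headI = 0) then 0
  else jmpAltLoop d 0

-- ===== PRECONDITION & SPEC =====
-- Pre_ excludes only the inputs where A raises IndexError: empty d while 2 ≤ n ≤ 100 (d[0] in the guard).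
def Pre_jmp (n : Int) (d : List Int) : Prop := ¬(2 ≤ n ∧ n ≤ 100 ∧ d = [])
instance (n : Int) (d : List Int) : Decidable (Pre_jmp n d) := by unfold Pre_jmp; infer_instance
def pvWitness_jmp : Int × List Int := (2, [0, 1, 0, 0, 1])

def Spec_jmp (n : Int) (d : List Int) (out : Int) : Prop := out = jmp_alt n d
instance (n : Int) (d : List Int) (out : Int) : Decidable (Spec_jmp n d out) := by unfold Spec_jmp; infer_instance

-- ===== CLAIM (what is proved, stated in full; the proofs are below) =====
def Claim_equal_jmp : Prop := ∀ (n : Int) (d : List Int), Dom_jmp n d → Pre_jmp n d → Spec_jmp n d (jmp n d)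

-- ===== LEMMAS AND PROOFS =====

-- A fold over a block with no 1 just accumulates the zero count.
theorem foldl_jmpStep_no_one (t : List Int) (a z : Int) (h1 : (1 : Int) ∉ t) :
    t.foldl jmpStep (a, z) = (a, z + (t.count 0 : Int)) := by
  induction t generalizing z with
  | nil => simp
  | cons x xs ih =>
    have hx1 : x ≠ 1 := by intro hx; exact h1 (by simp [hx])
    have hmem : (1 : Int) ∉ xs := fun hm => h1 (by simp [hm])
    by_cases hx0 : x = 0
    · subst hx0
      rw [List.foldl_cons, show jmpStep (a, z) 0 = (a, z + 1) by simp [jmpStep], ih _ hmem]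
      simp; ring
    · rw [List.foldl_cons, show jmpStep (a, z) x = (a, z) by simp [jmpStep, hx0, hx1],
        ih _ hmem]
      simp [hx0]

-- The accumulated score is additive.
theorem foldl_jmpStep_add (l : List Int) (a z : Int) :
    l.foldl jmpStep (a, z) = (a + (l.foldl jmpStep (0, z)).1, (l.foldl jmpStep (0, z)).2) := by
  induction l generalizing a z with
  | nil => simp
  | cons x xs ih =>
    rw [List.foldl_cons, List.foldl_cons]
    have hstep : jmpStep (a, z) x = ((jmpStep (0, z) x).1 + a, (jmpStep (0, z) x).2) := by
      simp only [jmpStep]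
      by_cases hx0 : x = 0 <;> by_cases hx1 : x = 1 <;>
        first
        | (simp [hx0, hx1]; ring)
        | simp [hx0, hx1]
    rw [hstep, ih ((jmpStep (0, z) x).1 + a)]
    rw [ih (jmpStep (0, z) x).1 (jmpStep (0, z) x).2]
    simp only [Prod.mk.injEq]
    exact ⟨by ring, by trivial⟩

-- B's segment loop computes A's fold.
theorem jmpAltLoop_eq (rest : List Int) (total : Int) :
    jmpAltLoop rest total = total + (rest.foldl jmpStep (0, 0)).1 := by
  induction hn : rest.length using Nat.strong_induction_on generalizing rest total with
  | _ L ih =>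
  rw [jmpAltLoop]
  split
  · next h =>
    rw [foldl_jmpStep_no_one _ _ _ ((PySem.List.index?_eq_none_iff _ _).mp h)]
    simp
  · next i h =>
    obtain ⟨pre, suf, hsplit, hlen, hpre⟩ := (PySem.List.index?_eq_some_iff _ _ _).mp h
    have hc1 : ((i : Int) + 1) = (((i + 1 : Nat) : Int)) := by push_cast; ring
    rw [hc1, PySem.List.slice_from_natCast, PySem.List.slice_to_natCast]
    subst hsplit
    have hdrop : (pre ++ 1 :: suf).drop (i + 1) = suf := by
      subst hlen; simp
    have htake : (pre ++ 1 :: suf).take i = pre := by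
      subst hlen; simp
    rw [hdrop, htake]
    have hsuf : suf.length < L := by rw [← hn]; simp; omega
    have hstep1 : jmpStep (0, 0 + (pre.count 0 : Int)) 1
        = (1 + PySem.Int.floordiv (pre.count 0 : Int) 2, 0) := by
      simp [jmpStep]
    rw [ih suf.length hsuf _ _ rfl, List.foldl_append, foldl_jmpStep_no_one pre 0 0 hpre,
        List.foldl_cons, hstep1,
        foldl_jmpStep_add suf (1 + PySem.Int.floordiv ((pre.count 0 : Nat) : Int) 2) 0,
        PySem.List.count_eq]
    simp
    ring

theorem jmp_spec : Claim_equal_jmp := by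
  intro n d _ hpre
  unfold Spec_jmp
  by_cases hg : 2 ≤ n ∧ n ≤ 100
  · cases d with
    | nil => exact absurd ⟨hg.1, hg.2, rfl⟩ hpre
    | cons x xs =>
      by_cases hx : x = 0
      · have hA : jmp n (x :: xs) = ((x :: xs).foldl jmpStep ((0 : Int), (0 : Int))).1 := by
          simp only [jmp, if_pos hg, PySem.List.pyGet?_zero_cons, if_pos hx]
          rw [PySem.List.foldl_pyRange_zero_pyGetD']
        have hB : jmp_alt n (x :: xs) = jmpAltLoop (x :: xs) 0 := by
          rw [jmp_alt, if_neg (by simp [hg, hx])]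
        rw [hA, hB, jmpAltLoop_eq]
        ring
      · have hA : jmp n (x :: xs) = 0 := by
          simp only [jmp, if_pos hg, PySem.List.pyGet?_zero_cons, if_neg hx]
        have hB : jmp_alt n (x :: xs) = 0 := by
          rw [jmp_alt, if_pos (by simp [hx])]
        rw [hA, hB]
  · have hA : jmp n d = 0 := by rw [jmp, if_neg hg]
    have hB : jmp_alt n d = 0 := by rw [jmp_alt, if_pos (by simp [hg])]
    rw [hA, hB]
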